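-- pv_equiv track=rewrite | github.com/cheetah671/aad_project | AAD_CP/codes/test.py | find_bridges_naive
-- ===== SOURCE A (Python) =====
-- import collections
--
-- def _count_reachable_nodes(adj_list, num_nodes, start_node, removed_vertex=None, removed_edge=None):
--     """
--     Helper function to count reachable nodes using BFS,
--     ignoring a specified vertex or edge.
--     """
--     visited = set()
--     queue = collections.deque()
--
--     # Handle case where the start_node is the one being removed
--     if start_node == removed_vertex:
--         # If the start_node is removed, we can't start a traversal from it.
--         # This function is designed to check connectivity of the *remaining* graph,
--         # so the caller must provide a valid start_node from the remaining nodes.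
--         return 0
--
--     queue.append(start_node)
--     visited.add(start_node)
--     count = 0
--
--     while queue:
--         u = queue.popleft()
--         count += 1
--
--         # Use .get() for safety, in case a node has no neighbors
--         for v in adj_list.get(u, []):
--             if v == removed_vertex or v in visited:
--                 continue
--
--             # Check if the edge (u, v) is the one to be removed
--             if removed_edge:
--                 if (u == removed_edge[0] and v == removed_edge[1]) or \
--                    (u == removed_edge[1] and v == removed_edge[0]):
--                     continue
--
--             visited.add(v)
--             queue.append(v)
--
--     return count
--
-- def find_bridges_naive(adj_list, num_nodes):
--     """
--     Finds all bridges using the naive O(E * (V+E)) method.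
--     """
--     if num_nodes <= 1:
--         return set()
--
--     bridges = set()
--     all_edges = set()
--
--     # 1. Get a unique list of all edges
--     for u in adj_list:
--         for v in adj_list[u]:
--             # Add as a sorted tuple to avoid duplicates like (0, 1) and (1, 0)
--             if u < v:
--                 all_edges.add((u, v))
--
--     # 2. Iterate through each edge and test removal
--     for u, v in all_edges:
--         edge_to_remove = (u, v)
--
--         # Count nodes reachable from any valid start node (e.g., node 0)
--         reachable_count = _count_reachable_nodes(adj_list,
--                                                  num_nodes,
--                                                  0,
--                                                  removed_edge=edge_to_remove)
--
--         # If not all nodes are reachable, the graph is disconnected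
--         if reachable_count < num_nodes:
--             bridges.add(edge_to_remove)
--
--     return bridges
-- ===== SOURCE B (Python) =====
-- def find_bridges_naive(adj_list, num_nodes):
--     edges = {(u, v) for u in adj_list for v in adj_list[u] if u < v}
--     nodes = {0} | set(adj_list) | {v for ns in adj_list.values() for v in ns}
--
--     def reach_count(a, b):
--         # reachable-from-0 set as a monotone fixpoint: |nodes| rounds saturate it
--         r = {0}
--         for _ in range(len(nodes)):
--             r = r | {v for u in r for v in adj_list.get(u, ())
--                      if not ((u == a and v == b) or (u == b and v == a))}
--         return len(r)
--
--     return {e for e in edges if reach_count(*e) < num_nodes}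
-- ===== Notes on version B (the rewrite author's own statement) =====
-- stated objective: simpler
-- what changed: B replaces A's queue-based BFS connectivity test (with visited-set bookkeeping and an unused removed-vertex mechanism) by a guard-free monotone fixpoint: the reachable set is saturated by |nodes| rounds of 'add all allowed neighbours', and the num_nodes<=1 early return disappears because a count of at least 1 never beats num_nodes<=1.
import Mathlib
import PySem

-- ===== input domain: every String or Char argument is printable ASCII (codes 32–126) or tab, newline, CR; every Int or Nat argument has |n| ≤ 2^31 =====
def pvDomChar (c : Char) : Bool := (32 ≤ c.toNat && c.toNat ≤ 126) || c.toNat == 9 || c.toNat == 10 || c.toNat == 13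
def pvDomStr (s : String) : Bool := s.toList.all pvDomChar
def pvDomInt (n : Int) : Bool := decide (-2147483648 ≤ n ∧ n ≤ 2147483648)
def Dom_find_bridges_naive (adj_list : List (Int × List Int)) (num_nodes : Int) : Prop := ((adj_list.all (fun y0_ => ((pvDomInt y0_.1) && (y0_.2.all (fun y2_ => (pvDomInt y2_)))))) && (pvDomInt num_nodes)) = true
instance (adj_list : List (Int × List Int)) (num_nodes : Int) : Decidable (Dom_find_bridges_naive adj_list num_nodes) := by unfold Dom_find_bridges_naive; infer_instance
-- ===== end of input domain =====

-- B re-implements the naive per-edge bridge test with a guard-free monotone-fixpoint (round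
-- saturation) reachability computation instead of A's queue-based BFS; same exact result.

-- ===== PORT A =====

-- all elements of the dict's neighbour lists (used only by pvBFS's termination measure)
def pvUniv (adj_list : List (Int × List Int)) : List Int :=
  adj_list.flatMap (fun p => p.2)

-- A's removed-edge test: `(u == removed_edge[0] and v == removed_edge[1]) or (…swapped…)`,
-- guarded by `if removed_edge:` (None = no removed edge)
def pvHit (re : Option (Int × Int)) (u v : Int) : Bool :=
  match re with
  | none => false
  | some (a, b) => (u == a && v == b) || (u == b && v == a)

-- one iteration of A's inner `for v in adj_list.get(u, [])` body, state = (visited, queue)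
def pvScanStep (rv : Option Int) (re : Option (Int × Int)) (u : Int)
    (st : PySem.Set Int × List Int) (v : Int) : PySem.Set Int × List Int :=
  if rv == some v || PySem.Set.contains st.1 v then st
  else if pvHit re u v then st
  else (PySem.Set.add st.1 v, st.2 ++ [v])

-- shape of the inner scan (cited by pvBFS's decreasing_by): it appends one list of fresh
-- neighbours to both visited and queue
lemma pvScan_shape (rv : Option Int) (re : Option (Int × Int)) (u : Int) (l : List Int) :
    ∀ (vis : PySem.Set Int) (q : List Int),
    ∃ d : List Int, l.foldl (pvScanStep rv re u) (vis, q) = (vis ++ d, q ++ d)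
      ∧ d.Nodup ∧ (∀ x ∈ d, x ∉ vis ∧ x ∈ l ∧ (rv == some x) = false ∧ pvHit re u x = false) := by
  induction l with
  | nil => intro vis q; exact ⟨[], by simp⟩
  | cons v t ih =>
    intro vis q
    by_cases h1 : (rv == some v || PySem.Set.contains vis v) = true
    · obtain ⟨d, hd, hnd, hp⟩ := ih vis q
      refine ⟨d, ?_, hnd, fun x hx => ⟨(hp x hx).1, .tail _ (hp x hx).2.1, (hp x hx).2.2⟩⟩
      simpa only [List.foldl_cons, pvScanStep, h1, if_true] using hd
    · by_cases h2 : pvHit re u v = true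
      · obtain ⟨d, hd, hnd, hp⟩ := ih vis q
        refine ⟨d, ?_, hnd, fun x hx => ⟨(hp x hx).1, .tail _ (hp x hx).2.1, (hp x hx).2.2⟩⟩
        simp only [List.foldl_cons, pvScanStep, h1, if_false, h2, if_true, Bool.false_eq_true]
        exact hd
      · have hnv : v ∉ vis := fun hv =>
          h1 (Bool.or_eq_true_iff.mpr (Or.inr ((PySem.Set.contains_iff vis v).mpr hv)))
        obtain ⟨d, hd, hnd, hp⟩ := ih (PySem.Set.add vis v) (q ++ [v])
        rw [PySem.Set.add_of_not_mem hnv] at hd hp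
        refine ⟨v :: d, ?_, ?_, ?_⟩
        · simp only [List.foldl_cons, pvScanStep, h1, if_false, h2, Bool.false_eq_true,
            PySem.Set.add_of_not_mem hnv]
          rw [hd]; simp
        · exact List.nodup_cons.mpr
            ⟨fun hv => by simpa using ((hp v hv).1 : v ∉ vis ++ [v]), hnd⟩
        · intro x hx
          rcases List.mem_cons.mp hx with rfl | hx
          · refine ⟨hnv, List.mem_cons_self, ?_, by simpa using h2⟩
            by_contra hr
            exact h1 (Bool.or_eq_true_iff.mpr (Or.inl (by simpa using hr)))
          · obtain ⟨hx1, hx2, hx3⟩ := hp x hx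
            exact ⟨fun hc => hx1 (List.mem_append_left _ hc), .tail _ hx2, hx3⟩

-- neighbour-list elements lie in pvUniv (cited by pvBFS's decreasing_by)
lemma pvMem_getD_univ (adj_list : List (Int × List Int)) (u v : Int)
    (h : v ∈ (PySem.Dict.mk adj_list).getD u []) : v ∈ pvUniv adj_list := by
  unfold PySem.Dict.getD PySem.Dict.get? at h
  cases hf : List.find? (fun p => p.1 == u) (PySem.Dict.mk adj_list).items with
  | none => rw [hf] at h; simp at h
  | some p =>
    rw [hf] at h; simp at h
    exact List.mem_flatMap.mpr ⟨p, List.mem_of_find?_eq_some hf, h⟩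

-- A's `while queue:` loop of _count_reachable_nodes
def pvBFS (adj_list : List (Int × List Int)) (rv : Option Int) (re : Option (Int × Int))
    (queue : List Int) (visited : PySem.Set Int) (count : Int) : Int :=
  match queue with
  | [] => count
  | u :: rest =>
    let st := ((PySem.Dict.mk adj_list).getD u []).foldl (pvScanStep rv re u) (visited, rest)
    pvBFS adj_list rv re st.2 st.1 (count + 1)
termination_by (((pvUniv adj_list).toFinset \ visited.toFinset).card, queue.length)
decreasing_by
  obtain ⟨d, hd, hnd, hp⟩ :=
    pvScan_shape rv re u ((PySem.Dict.mk adj_list).getD u []) visited rest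
  rw [hd]
  cases d with
  | nil =>
    simp only [List.append_nil]
    exact Prod.Lex.right _ (by simp)
  | cons x d' =>
    apply Prod.Lex.left
    apply Finset.card_lt_card
    refine (Finset.ssubset_iff_of_subset ?_).mpr ?_
    · refine Finset.sdiff_subset_sdiff (Finset.Subset.refl _) ?_
      intro y hy
      simp only [List.toFinset_append, Finset.mem_union] at *
      exact Or.inl hy
    · refine ⟨x, ?_, ?_⟩
      · exact Finset.mem_sdiff.mpr
          ⟨List.mem_toFinset.mpr (pvMem_getD_univ adj_list u x (hp x List.mem_cons_self).2.1),
           fun hc => (hp x List.mem_cons_self).1 (List.mem_toFinset.mp hc)⟩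
      · intro hcon
        simp only [Finset.mem_sdiff, List.mem_toFinset, List.mem_append, List.mem_cons] at hcon
        exact hcon.2 (Or.inr (Or.inl (by simp)))

-- A's _count_reachable_nodes
def pvCountReachable (adj_list : List (Int × List Int)) (num_nodes : Int) (start_node : Int)
    (removed_vertex : Option Int) (removed_edge : Option (Int × Int)) : Int :=
  if removed_vertex == some start_node then 0
  else pvBFS adj_list removed_vertex removed_edge [start_node]
    (PySem.Set.add PySem.Set.empty start_node) 0

def find_bridges_naive (adj_list : List (Int × List Int)) (num_nodes : Int) : List (Int × Int) :=
  if num_nodes ≤ 1 then PySem.Set.empty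
  else
    ((PySem.Dict.mk adj_list).keys.foldl (fun s u =>
        ((PySem.Dict.mk adj_list).getD u []).foldl
          (fun s v => if u < v then PySem.Set.add s (u, v) else s) s)
        PySem.Set.empty).foldl (fun br e =>
      if pvCountReachable adj_list num_nodes 0 none (some e) < num_nodes
      then PySem.Set.add br e else br) PySem.Set.empty

-- ===== PORT B =====

-- B's `nodes = {0} | set(adj_list) | {v for ns in adj_list.values() for v in ns}`
def pvNodes (adj_list : List (Int × List Int)) : PySem.Set Int :=
  PySem.Set.union
    (PySem.Set.union (PySem.Set.ofList [0]) (PySem.Set.ofList (PySem.Dict.mk adj_list).keys))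
    (PySem.Set.ofList ((PySem.Dict.mk adj_list).values.flatMap (fun ns => ns)))

-- B's `r = r | {v for u in r for v in adj_list.get(u, ()) if not (…removed…)}`
def pvSatStep (adj_list : List (Int × List Int)) (a b : Int) (r : PySem.Set Int) :
    PySem.Set Int :=
  PySem.Set.union r (PySem.Set.ofList (r.flatMap (fun u =>
    ((PySem.Dict.mk adj_list).getD u []).filter
      (fun v => !((u == a && v == b) || (u == b && v == a))))))

-- B's reach_count: saturate from {0} for len(nodes) rounds, then len(r)
def pvReachCount (adj_list : List (Int × List Int)) (a b : Int) (rounds : Nat) : Int :=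
  (((List.range rounds).foldl (fun r _ => pvSatStep adj_list a b r)
    (PySem.Set.add PySem.Set.empty 0)).length : Int)

def find_bridges_naive_alt (adj_list : List (Int × List Int)) (num_nodes : Int) :
    List (Int × Int) :=
  PySem.Set.ofList ((PySem.Set.ofList ((PySem.Dict.mk adj_list).keys.flatMap (fun u =>
      (((PySem.Dict.mk adj_list).getD u []).filter (fun v => decide (u < v))).map
        (fun v => (u, v))))).filter (fun e =>
    decide (pvReachCount adj_list e.1 e.2 (pvNodes adj_list).length < num_nodes)))

-- ===== PRECONDITION & SPEC =====
def Spec_find_bridges_naive (adj_list : List (Int × List Int)) (num_nodes : Int) (out : List (Int × Int)) : Prop := out = find_bridges_naive_alt adj_list num_nodes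
instance (adj_list : List (Int × List Int)) (num_nodes : Int) (out : List (Int × Int)) : Decidable (Spec_find_bridges_naive adj_list num_nodes out) := by unfold Spec_find_bridges_naive; infer_instance

-- ===== CLAIM (what is proved, stated in full; the proofs are below) =====
def Claim_equal_find_bridges_naive : Prop := ∀ (adj_list : List (Int × List Int)) (num_nodes : Int), Dom_find_bridges_naive adj_list num_nodes → Spec_find_bridges_naive adj_list num_nodes (find_bridges_naive adj_list num_nodes)

-- ===== LEMMAS AND PROOFS =====

-- one allowed traversal step of the graph with edge e removed (shared spec of both searches)
def pvStepOK (adj_list : List (Int × List Int)) (e : Int × Int) (u v : Int) : Prop :=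
  v ∈ (PySem.Dict.mk adj_list).getD u [] ∧ pvHit (some e) u v = false

inductive pvReach (adj_list : List (Int × List Int)) (e : Int × Int) : Int → Prop
  | base : pvReach adj_list e 0
  | step {u v : Int} : pvReach adj_list e u → pvStepOK adj_list e u v → pvReach adj_list e v

-- a "good" set: the distinct reachable-from-0 vertices, in any order
def pvGood (adj_list : List (Int × List Int)) (e : Int × Int) (V : List Int) : Prop :=
  V.Nodup ∧ 0 ∈ V ∧ (∀ x ∈ V, pvReach adj_list e x) ∧
    (∀ u ∈ V, ∀ v, pvStepOK adj_list e u v → v ∈ V)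

lemma pvGood_mem {adj_list : List (Int × List Int)} {e : Int × Int} {V : List Int}
    (h : pvGood adj_list e V) : ∀ x, x ∈ V ↔ pvReach adj_list e x := by
  obtain ⟨hnd, h0, hs, hc⟩ := h
  intro x
  constructor
  · exact hs x
  · intro hr
    induction hr with
    | base => exact h0
    | step hu hst ih => exact hc _ ih _ hst

lemma pvGood_length {adj_list : List (Int × List Int)} {e : Int × Int} {V W : List Int}
    (hV : pvGood adj_list e V) (hW : pvGood adj_list e W) : V.length = W.length :=
  List.Perm.length_eq ((List.perm_ext_iff_of_nodup hV.1 hW.1).mpr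
    (fun x => (pvGood_mem hV x).trans (pvGood_mem hW x).symm))

-- every allowed neighbour of u ends up in the visited set after A's inner scan
lemma pvScan_complete (rv : Option Int) (re : Option (Int × Int)) (u : Int) (l : List Int) :
    ∀ (vis : PySem.Set Int) (q : List Int) (v : Int), v ∈ l → (rv == some v) = false →
    pvHit re u v = false → v ∈ (l.foldl (pvScanStep rv re u) (vis, q)).1 := by
  induction l with
  | nil => simp
  | cons w t ih =>
    intro vis q v hv hrv hhit
    rcases List.mem_cons.mp hv with rfl | hv
    · simp only [List.foldl_cons]
      by_cases h1 : (rv == some v || PySem.Set.contains vis v) = true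
      · have hvv : v ∈ vis := by
          rcases Bool.or_eq_true_iff.mp h1 with h | h
          · rw [hrv] at h; cases h
          · exact (PySem.Set.contains_iff vis v).mp h
        have hstep : pvScanStep rv re u (vis, q) v = (vis, q) := by
          simp only [pvScanStep, h1, if_true]
        rw [hstep]
        obtain ⟨d, hd, -, -⟩ := pvScan_shape rv re u t vis q
        rw [hd]
        exact List.mem_append_left _ hvv
      · have hnv : v ∉ vis := fun hvv =>
          h1 (Bool.or_eq_true_iff.mpr (Or.inr ((PySem.Set.contains_iff vis v).mpr hvv)))
        have hb1 : (rv == some v || PySem.Set.contains vis v) = false := by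
          simpa using h1
        have hstep : pvScanStep rv re u (vis, q) v = (vis ++ [v], q ++ [v]) := by
          simp only [pvScanStep, hb1, Bool.false_eq_true, if_false, hhit]
          rw [PySem.Set.add_of_not_mem hnv]
        rw [hstep]
        obtain ⟨d, hd, -, -⟩ := pvScan_shape rv re u t (vis ++ [v]) (q ++ [v])
        rw [hd]
        exact List.mem_append_left _ (List.mem_append_right _ List.mem_cons_self)
    · simp only [List.foldl_cons]
      have := ih (pvScanStep rv re u (vis, q) w).1 (pvScanStep rv re u (vis, q) w).2 v hv hrv hhit
      simpa using this

-- the BFS loop computes the size of a good set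
lemma pvBFS_eq (adj_list : List (Int × List Int)) (e : Int × Int) :
    ∀ (n : Nat) (q : List Int) (vis : PySem.Set Int) (c : Int),
    ((pvUniv adj_list).toFinset \ vis.toFinset).card = n →
    vis.Nodup → q.Nodup → (∀ x ∈ q, x ∈ vis) →
    c = (vis.length : Int) - (q.length : Int) →
    0 ∈ vis → (∀ x ∈ vis, pvReach adj_list e x) →
    (∀ u ∈ vis, u ∉ q → ∀ v, pvStepOK adj_list e u v → v ∈ vis) →
    ∃ V, pvGood adj_list e V ∧ pvBFS adj_list none (some e) q vis c = (V.length : Int) := by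
  intro n
  induction n using Nat.strong_induction_on with
  | _ n ihn =>
  intro q
  induction q with
  | nil =>
    intro vis c hcard hvnd hqnd hqv hc h0 hsound hclosed
    refine ⟨vis, ⟨hvnd, h0, hsound, fun u hu v hst => hclosed u hu (by simp) v hst⟩, ?_⟩
    rw [pvBFS]
    simpa using hc
  | cons u rest ihq =>
    intro vis c hcard hvnd hqnd hqv hc h0 hsound hclosed
    rw [pvBFS]
    obtain ⟨d, hd, hdnd, hdp⟩ :=
      pvScan_shape none (some e) u ((PySem.Dict.mk adj_list).getD u []) vis rest
    simp only [hd]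
    have hu_vis : u ∈ vis := hqv u List.mem_cons_self
    have hrestnd : rest.Nodup := (List.nodup_cons.mp hqnd).2
    have hunrest : u ∉ rest := (List.nodup_cons.mp hqnd).1
    -- invariants for the new state
    have hvnd' : (vis ++ d).Nodup := by
      refine List.nodup_append.mpr ⟨hvnd, hdnd, ?_⟩
      intro x hx1 y hy2 hxy
      exact (hdp y hy2).1 (hxy ▸ hx1)
    have hqnd' : (rest ++ d).Nodup := by
      refine List.nodup_append.mpr ⟨hrestnd, hdnd, ?_⟩
      intro x hx1 y hy2 hxy
      exact (hdp y hy2).1 (hxy ▸ hqv x (List.mem_cons_of_mem _ hx1))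
    have hqv' : ∀ x ∈ rest ++ d, x ∈ vis ++ d := by
      intro x hx
      rcases List.mem_append.mp hx with hx | hx
      · exact List.mem_append_left _ (hqv x (List.mem_cons_of_mem _ hx))
      · exact List.mem_append_right _ hx
    have hc' : c + 1 = ((vis ++ d).length : Int) - ((rest ++ d).length : Int) := by
      simp only [List.length_append, List.length_cons] at hc ⊢
      push_cast at hc ⊢
      omega
    have h0' : 0 ∈ vis ++ d := List.mem_append_left _ h0
    have hsound' : ∀ x ∈ vis ++ d, pvReach adj_list e x := by
      intro x hx
      rcases List.mem_append.mp hx with hx | hx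
      · exact hsound x hx
      · exact pvReach.step (hsound u hu_vis) ⟨(hdp x hx).2.1, (hdp x hx).2.2.2⟩
    have hclosed' : ∀ w ∈ vis ++ d, w ∉ rest ++ d → ∀ v, pvStepOK adj_list e w v → v ∈ vis ++ d := by
      intro w hw hwq v hst
      rcases List.mem_append.mp hw with hw | hw
      · by_cases hwu : w = u
        · subst hwu
          have := pvScan_complete none (some e) w ((PySem.Dict.mk adj_list).getD w []) vis rest
            v hst.1 (by simp) hst.2
          rw [hd] at this
          exact this
        · have : v ∈ vis := hclosed w hw (by
            intro hcon
            rcases List.mem_cons.mp hcon with h | h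
            · exact hwu h
            · exact hwq (List.mem_append_left _ h)) v hst
          exact List.mem_append_left _ this
      · exact absurd (List.mem_append_right rest hw) hwq
    -- recurse: either nothing was added (structural) or the visited set grew (measure)
    cases d with
    | nil =>
      simp only [List.append_nil] at hvnd' hqnd' hqv' hc' h0' hsound' hclosed' ⊢
      exact ihq vis (c + 1) hcard hvnd' hqnd' hqv' hc' h0' hsound' hclosed'
    | cons x d' =>
      have hxu : x ∈ (pvUniv adj_list).toFinset :=
        List.mem_toFinset.mpr (pvMem_getD_univ adj_list u x (hdp x List.mem_cons_self).2.1)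
      have hcard' : ((pvUniv adj_list).toFinset \ (vis ++ x :: d').toFinset).card < n := by
        rw [← hcard]
        apply Finset.card_lt_card
        refine (Finset.ssubset_iff_of_subset ?_).mpr ?_
        · refine Finset.sdiff_subset_sdiff (Finset.Subset.refl _) ?_
          intro y hy
          simp only [List.toFinset_append, Finset.mem_union] at *
          exact Or.inl hy
        · refine ⟨x, ?_, ?_⟩
          · exact Finset.mem_sdiff.mpr ⟨hxu, fun hc => (hdp x List.mem_cons_self).1 (List.mem_toFinset.mp hc)⟩
          · simp only [Finset.mem_sdiff, List.mem_toFinset, List.mem_append, List.mem_cons]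
            intro hcon
            exact hcon.2 (Or.inr (Or.inl (by simp)))
      exact ihn _ hcard' (rest ++ x :: d') (vis ++ x :: d') (c + 1) rfl
        hvnd' hqnd' hqv' hc' h0' hsound' hclosed'

-- ===== B-side: the saturation loop computes the size of a good set =====

def pvSat (adj_list : List (Int × List Int)) (a b : Int) (k : Nat) : PySem.Set Int :=
  (List.range k).foldl (fun r _ => pvSatStep adj_list a b r) (PySem.Set.add PySem.Set.empty 0)

lemma pvSat_zero (adj_list : List (Int × List Int)) (a b : Int) : pvSat adj_list a b 0 = [0] := rfl

lemma pvSat_succ (adj_list : List (Int × List Int)) (a b : Int) (k : Nat) :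
    pvSat adj_list a b (k + 1) = pvSatStep adj_list a b (pvSat adj_list a b k) := by
  unfold pvSat
  rw [List.range_succ, List.foldl_append]
  simp

lemma pvMem_satStep (adj_list : List (Int × List Int)) (a b : Int) (r : PySem.Set Int) (x : Int) :
    x ∈ pvSatStep adj_list a b r ↔
      x ∈ r ∨ ∃ u ∈ r, pvStepOK adj_list (a, b) u x := by
  unfold pvSatStep
  rw [PySem.Set.mem_union, PySem.Set.mem_ofList, List.mem_flatMap]
  apply or_congr Iff.rfl
  constructor
  · rintro ⟨u, hu, hx⟩
    have hm := List.mem_filter.mp hx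
    refine ⟨u, hu, hm.1, ?_⟩
    show (u == a && x == b || u == b && x == a) = false
    have h := hm.2
    cases hcb : (u == a && x == b || u == b && x == a)
    · rfl
    · rw [hcb] at h; simp at h
  · rintro ⟨u, hu, h1, h2⟩
    refine ⟨u, hu, List.mem_filter.mpr ⟨h1, ?_⟩⟩
    have h2' : (u == a && x == b || u == b && x == a) = false := h2
    simp [h2']

lemma pvSat_nodup (adj_list : List (Int × List Int)) (a b : Int) (k : Nat) :
    (pvSat adj_list a b k).Nodup := by
  induction k with
  | zero => rw [pvSat_zero]; simp
  | succ k ih => rw [pvSat_succ]; exact PySem.Set.nodup_union _ _ ih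

lemma pvSat_zero_mem (adj_list : List (Int × List Int)) (a b : Int) (k : Nat) :
    (0 : Int) ∈ pvSat adj_list a b k := by
  induction k with
  | zero => rw [pvSat_zero]; simp
  | succ k ih => rw [pvSat_succ]; exact (pvMem_satStep _ _ _ _ _).mpr (Or.inl ih)

lemma pvSat_sound (adj_list : List (Int × List Int)) (a b : Int) (k : Nat) :
    ∀ x ∈ pvSat adj_list a b k, pvReach adj_list (a, b) x := by
  induction k with
  | zero => rw [pvSat_zero]; rintro x hx; simp at hx; subst hx; exact pvReach.base
  | succ k ih =>
    rw [pvSat_succ]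
    intro x hx
    rcases (pvMem_satStep _ _ _ _ _).mp hx with hx | ⟨u, hu, hst⟩
    · exact ih x hx
    · exact pvReach.step (ih u hu) hst

lemma pvSat_subset_nodes (adj_list : List (Int × List Int)) (a b : Int) (k : Nat) :
    ∀ x ∈ pvSat adj_list a b k, x ∈ pvNodes adj_list := by
  have hmem : ∀ x : Int, x = 0 ∨ x ∈ pvUniv adj_list → x ∈ pvNodes adj_list := by
    intro x hx
    unfold pvNodes
    rw [PySem.Set.mem_union, PySem.Set.mem_union, PySem.Set.mem_ofList, PySem.Set.mem_ofList,
      PySem.Set.mem_ofList]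
    rcases hx with rfl | hx
    · exact Or.inl (Or.inl (by simp))
    · refine Or.inr ?_
      unfold pvUniv at hx
      unfold PySem.Dict.values
      rw [List.flatMap_map]
      exact hx
  induction k with
  | zero => rw [pvSat_zero]; rintro x hx; simp at hx; subst hx; exact hmem 0 (Or.inl rfl)
  | succ k ih =>
    rw [pvSat_succ]
    intro x hx
    rcases (pvMem_satStep _ _ _ _ _).mp hx with hx | ⟨u, hu, hst⟩
    · exact ih x hx
    · exact hmem x (Or.inr (pvMem_getD_univ adj_list u x hst.1))

lemma pvNodes_nodup (adj_list : List (Int × List Int)) : (pvNodes adj_list).Nodup := by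
  unfold pvNodes
  exact PySem.Set.nodup_union _ _ (PySem.Set.nodup_union _ _ (PySem.Set.nodup_ofList _))

lemma pvNodup_length_le {l1 l2 : List Int} (h1 : l1.Nodup) (h2 : l2.Nodup)
    (hs : ∀ x ∈ l1, x ∈ l2) : l1.length ≤ l2.length := by
  rw [← List.toFinset_card_of_nodup h1, ← List.toFinset_card_of_nodup h2]
  exact Finset.card_le_card (fun x hx => List.mem_toFinset.mpr (hs x (List.mem_toFinset.mp hx)))

lemma pvSat_stab (adj_list : List (Int × List Int)) (a b : Int) (k : Nat)
    (h : pvSat adj_list a b (k + 1) = pvSat adj_list a b k) :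
    ∀ m : Nat, pvSat adj_list a b (k + m) = pvSat adj_list a b k := by
  intro m
  induction m with
  | zero => rfl
  | succ m ih =>
    have : k + (m + 1) = (k + m) + 1 := by omega
    rw [this, pvSat_succ, ih, ← pvSat_succ, h]

lemma pvAppend_ne_length {r d : List Int} (h : r ++ d ≠ r) : r.length + 1 ≤ (r ++ d).length := by
  cases d with
  | nil => simp at h
  | cons z zs => simp

lemma pvSat_grow (adj_list : List (Int × List Int)) (a b : Int) (k : Nat)
    (h : pvSat adj_list a b (k + 1) ≠ pvSat adj_list a b k) :
    (pvSat adj_list a b k).length + 1 ≤ (pvSat adj_list a b (k + 1)).length := by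
  rw [pvSat_succ] at h ⊢
  unfold pvSatStep PySem.Set.union at h ⊢
  rw [PySem.Set.update_eq_append_filter] at h ⊢
  exact pvAppend_ne_length h

lemma pvSat_min_length (adj_list : List (Int × List Int)) (a b : Int) (k : Nat)
    (h : ∀ j < k, pvSat adj_list a b (j + 1) ≠ pvSat adj_list a b j) :
    k + 1 ≤ (pvSat adj_list a b k).length := by
  induction k with
  | zero => rw [pvSat_zero]; simp
  | succ k ih =>
    have h1 := ih (fun j hj => h j (by omega))
    have h2 := pvSat_grow adj_list a b k (h k (by omega))
    omega

lemma pvSat_good (adj_list : List (Int × List Int)) (a b : Int) :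
    pvGood adj_list (a, b) (pvSat adj_list a b (pvNodes adj_list).length) := by
  set N := (pvNodes adj_list).length with hN
  have hstable : pvSatStep adj_list a b (pvSat adj_list a b N) = pvSat adj_list a b N := by
    by_cases hall : ∀ j < N, pvSat adj_list a b (j + 1) ≠ pvSat adj_list a b j
    · exfalso
      have h1 := pvSat_min_length adj_list a b N hall
      have h2 := pvNodup_length_le (pvSat_nodup adj_list a b N) (pvNodes_nodup adj_list)
        (pvSat_subset_nodes adj_list a b N)
      omega
    · push_neg at hall
      obtain ⟨j, hj, hstab⟩ := hall
      have hjN : pvSat adj_list a b N = pvSat adj_list a b j := by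
        have : N = j + (N - j) := by omega
        rw [this]
        exact pvSat_stab adj_list a b j hstab (N - j)
      rw [hjN, ← pvSat_succ, hstab]
  refine ⟨pvSat_nodup adj_list a b N, pvSat_zero_mem adj_list a b N,
    pvSat_sound adj_list a b N, ?_⟩
  intro u hu v hst
  have : v ∈ pvSatStep adj_list a b (pvSat adj_list a b N) :=
    (pvMem_satStep _ _ _ _ _).mpr (Or.inr ⟨u, hu, hst⟩)
  rwa [hstable] at this

-- the two per-edge counts agree
lemma pvCounts_eq (adj_list : List (Int × List Int)) (num_nodes : Int) (e : Int × Int) :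
    pvCountReachable adj_list num_nodes 0 none (some e) =
      pvReachCount adj_list e.1 e.2 (pvNodes adj_list).length := by
  obtain ⟨a, b⟩ := e
  have hsat : pvReachCount adj_list a b (pvNodes adj_list).length =
      ((pvSat adj_list a b (pvNodes adj_list).length).length : Int) := rfl
  unfold pvCountReachable
  rw [if_neg (by simp)]
  have hinit : PySem.Set.add PySem.Set.empty (0 : Int) = [0] := rfl
  rw [hinit]
  obtain ⟨V, hV, hval⟩ := pvBFS_eq adj_list (a, b)
    (((pvUniv adj_list).toFinset \ ([0] : List Int).toFinset).card) [0] [0] 0 rfl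
    (by simp) (by simp) (by simp) (by simp) (by simp)
    (by rintro x hx; simp at hx; subst hx; exact pvReach.base)
    (by rintro u hu hq v hst; simp at hu; exact absurd (by simp [hu]) hq)
  rw [hval, hsat]
  exact congrArg _ (pvGood_length hV (pvSat_good adj_list a b))

-- B's count is at least 1 (the start vertex is always reached)
lemma pvReachCount_pos (adj_list : List (Int × List Int)) (a b : Int) :
    1 ≤ pvReachCount adj_list a b (pvNodes adj_list).length := by
  have h0 := pvSat_zero_mem adj_list a b (pvNodes adj_list).length
  have : 0 < (pvSat adj_list a b (pvNodes adj_list).length).length := List.length_pos_of_mem h0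
  unfold pvReachCount
  have hsat : ((List.range (pvNodes adj_list).length).foldl
      (fun r _ => pvSatStep adj_list a b r) (PySem.Set.add PySem.Set.empty 0)) =
      pvSat adj_list a b (pvNodes adj_list).length := rfl
  rw [hsat]
  omega

-- edge enumeration: A's nested loop builds exactly B's comprehension list
lemma pvInner_edges (u : Int) (l : List Int) :
    ∀ s : PySem.Set (Int × Int),
    l.foldl (fun s v => if u < v then PySem.Set.add s (u, v) else s) s =
      PySem.Set.update s ((l.filter (fun v => decide (u < v))).map (fun v => (u, v))) := by
  induction l with
  | nil => intro s; simp [PySem.Set.update]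
  | cons v t ih =>
    intro s
    by_cases h : u < v
    · rw [List.foldl_cons, if_pos h, List.filter_cons, if_pos (by simpa using h),
        List.map_cons, PySem.Set.update_cons, ih]
    · rw [List.foldl_cons, if_neg h, List.filter_cons, if_neg (by simpa using h), ih]

lemma pvOuter_edges (adj_list : List (Int × List Int)) :
    ∀ (ks : List Int) (s : PySem.Set (Int × Int)),
    ks.foldl (fun s u =>
      ((PySem.Dict.mk adj_list).getD u []).foldl
        (fun s v => if u < v then PySem.Set.add s (u, v) else s) s) s =
      PySem.Set.update s (ks.flatMap (fun u =>
        (((PySem.Dict.mk adj_list).getD u []).filter (fun v => decide (u < v))).map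
          (fun v => (u, v)))) := by
  intro ks
  induction ks with
  | nil => intro s; simp [PySem.Set.update]
  | cons u t ih =>
    intro s
    simp only [List.foldl_cons, List.flatMap_cons]
    rw [pvInner_edges, PySem.Set.update_append, ih]

-- conditional-add loop over a duplicate-free list is a filter
lemma pvFoldl_condAdd (p : Int × Int → Prop) [DecidablePred p] :
    ∀ (l : List (Int × Int)) (s : PySem.Set (Int × Int)), l.Nodup → (∀ x ∈ l, x ∉ s) →
    l.foldl (fun s x => if p x then PySem.Set.add s x else s) s =
      s ++ l.filter (fun x => decide (p x)) := by
  intro l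
  induction l with
  | nil => intro s _ _; simp
  | cons x t ih =>
    intro s hnd hns
    by_cases h : p x
    · have hdisj : ∀ y ∈ t, y ∉ s ++ [x] := by
        intro y hy hcon
        rcases List.mem_append.mp hcon with hc | hc
        · exact hns y (List.mem_cons_of_mem _ hy) hc
        · simp at hc
          subst hc
          exact (List.nodup_cons.mp hnd).1 hy
      rw [List.foldl_cons, if_pos h, PySem.Set.add_of_not_mem (hns x List.mem_cons_self),
        ih (s ++ [x]) (List.nodup_cons.mp hnd).2 hdisj, List.filter_cons,
        if_pos (show decide (p x) = true by simpa using h)]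
      simp
    · rw [List.foldl_cons, if_neg h, ih s (List.nodup_cons.mp hnd).2
        (fun y hy => hns y (List.mem_cons_of_mem _ hy)), List.filter_cons,
        if_neg (show ¬ decide (p x) = true by simpa using h)]

-- ===== VERDICT (by name: the statement is the Claim_ definition above) =====
theorem find_bridges_naive_spec : Claim_equal_find_bridges_naive := by
  unfold Claim_equal_find_bridges_naive
  intro adj_list num_nodes _
  unfold Spec_find_bridges_naive
  unfold find_bridges_naive find_bridges_naive_alt
  set E : PySem.Set (Int × Int) := PySem.Set.ofList ((PySem.Dict.mk adj_list).keys.flatMap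
    (fun u => (((PySem.Dict.mk adj_list).getD u []).filter (fun v => decide (u < v))).map
      (fun v => (u, v)))) with hE
  have hEnd : E.Nodup := PySem.Set.nodup_ofList _
  by_cases hn : num_nodes ≤ 1
  · rw [if_pos hn]
    have hfilter : E.filter (fun e =>
        decide (pvReachCount adj_list e.1 e.2 (pvNodes adj_list).length < num_nodes)) = [] := by
      apply List.filter_eq_nil_iff.mpr
      intro e he
      simp only [decide_eq_true_eq, not_lt]
      have := pvReachCount_pos adj_list e.1 e.2
      omega
    rw [hfilter]
    rfl
  · rw [if_neg hn]
    have hedges : ((PySem.Dict.mk adj_list).keys.foldl (fun s u =>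
        ((PySem.Dict.mk adj_list).getD u []).foldl
          (fun s v => if u < v then PySem.Set.add s (u, v) else s) s) PySem.Set.empty) = E := by
      rw [pvOuter_edges]
      rfl
    rw [hedges]
    rw [pvFoldl_condAdd (fun e => pvCountReachable adj_list num_nodes 0 none (some e) < num_nodes)
      E PySem.Set.empty hEnd (by intro x _ hc; simp [PySem.Set.empty] at hc)]
    have hps : E.filter (fun e => decide (pvCountReachable adj_list num_nodes 0 none (some e) < num_nodes)) =
        E.filter (fun e => decide (pvReachCount adj_list e.1 e.2 (pvNodes adj_list).length < num_nodes)) := by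
      apply List.filter_congr
      intro e _
      rw [pvCounts_eq adj_list num_nodes e]
    rw [PySem.Set.ofList_eq_self_of_nodup _ (List.Nodup.filter _ hEnd)]
    rw [hps]
    simp [PySem.Set.empty]
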